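-- pv_equiv track=rewrite | github.com/EdytaLys/api-spec-mcp | scripts/create_api_update_story.py | _default_errors
-- ===== SOURCE A (Python) =====
-- def _default_errors(method: str) -> str:
--     lines = [
--         "200 — successful response" if method in ("GET", "PATCH") else "201 — created",
--         "400 — validation error / bad request",
--         "401 — unauthorized",
--     ]
--     if method in ("GET", "PATCH", "PUT", "DELETE"):
--         lines.append("404 — resource not found")
--     if method in ("POST", "PATCH", "PUT"):
--         lines.append("409 — conflict (e.g. duplicate unique field)")
--     lines.append("500 — internal server error")
--     return "\n".join(f"- {l}" for l in lines)
-- ===== SOURCE B (Python) =====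
-- _COMMON = ["400 — validation error / bad request", "401 — unauthorized"]
-- _E404 = "404 — resource not found"
-- _E409 = "409 — conflict (e.g. duplicate unique field)"
-- _E500 = "500 — internal server error"
--
-- _TABLE = {
--     "GET":    ["200 — successful response"] + _COMMON + [_E404, _E500],
--     "PATCH":  ["200 — successful response"] + _COMMON + [_E404, _E409, _E500],
--     "PUT":    ["201 — created"] + _COMMON + [_E404, _E409, _E500],
--     "DELETE": ["201 — created"] + _COMMON + [_E404, _E500],
--     "POST":   ["201 — created"] + _COMMON + [_E409, _E500],
-- }
-- _DEFAULT = ["201 — created"] + _COMMON + [_E500]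
--
-- def _default_errors(method: str) -> str:
--     return "\n".join("- " + l for l in _TABLE.get(method, _DEFAULT))
-- ===== Notes on version B (the rewrite author's own statement) =====
-- stated objective: simpler
-- what changed: Replaced incremental conditional list-building with a precomputed method->lines table plus a default entry; the body is a single dict lookup and a join.
import Mathlib
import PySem

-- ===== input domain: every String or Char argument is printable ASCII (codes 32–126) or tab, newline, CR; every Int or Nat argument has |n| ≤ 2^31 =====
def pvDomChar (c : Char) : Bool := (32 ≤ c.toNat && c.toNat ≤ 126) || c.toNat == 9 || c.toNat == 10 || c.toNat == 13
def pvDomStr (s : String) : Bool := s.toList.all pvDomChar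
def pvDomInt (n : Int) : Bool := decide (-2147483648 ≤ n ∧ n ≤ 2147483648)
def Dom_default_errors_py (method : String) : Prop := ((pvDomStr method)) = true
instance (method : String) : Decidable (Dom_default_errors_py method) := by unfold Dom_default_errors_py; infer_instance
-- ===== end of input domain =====

-- B replaces A's incremental conditional appends by a precomputed method→lines table with a default entry (objective: simpler).

-- ===== PORT A =====
def default_errors_py (method : String) : String :=
  let lines : List String :=
    [ if ["GET", "PATCH"].contains method then "200 — successful response" else "201 — created",
      "400 — validation error / bad request",
      "401 — unauthorized" ]
  let lines := if ["GET", "PATCH", "PUT", "DELETE"].contains method then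
      lines ++ ["404 — resource not found"] else lines
  let lines := if ["POST", "PATCH", "PUT"].contains method then
      lines ++ ["409 — conflict (e.g. duplicate unique field)"] else lines
  let lines := lines ++ ["500 — internal server error"]
  PySem.Str.join "\n" (lines.map (fun l => "- " ++ l))

-- ===== PORT B =====
def pvCommon : List String := ["400 — validation error / bad request", "401 — unauthorized"]
def pvE404 : String := "404 — resource not found"
def pvE409 : String := "409 — conflict (e.g. duplicate unique field)"
def pvE500 : String := "500 — internal server error"

def pvTable : PySem.Dict String (List String) := PySem.Dict.ofList
  [ ("GET",    ["200 — successful response"] ++ pvCommon ++ [pvE404, pvE500]),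
    ("PATCH",  ["200 — successful response"] ++ pvCommon ++ [pvE404, pvE409, pvE500]),
    ("PUT",    ["201 — created"] ++ pvCommon ++ [pvE404, pvE409, pvE500]),
    ("DELETE", ["201 — created"] ++ pvCommon ++ [pvE404, pvE500]),
    ("POST",   ["201 — created"] ++ pvCommon ++ [pvE409, pvE500]) ]

def pvDefault : List String := ["201 — created"] ++ pvCommon ++ [pvE500]

def default_errors_py_alt (method : String) : String :=
  PySem.Str.join "\n" ((PySem.Dict.getD pvTable method pvDefault).map (fun l => "- " ++ l))

-- ===== PRECONDITION & SPEC =====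
def Spec_default_errors_py (method : String) (out : String) : Prop := out = default_errors_py_alt method
instance (method : String) (out : String) : Decidable (Spec_default_errors_py method out) := by unfold Spec_default_errors_py; infer_instance

-- ===== CLAIM (what is proved, stated in full; the proofs are below) =====
def Claim_equal_default_errors_py : Prop := ∀ (method : String), Dom_default_errors_py method → Spec_default_errors_py method (default_errors_py method)

-- ===== LEMMAS AND PROOFS =====

-- ===== VERDICT (by name: the statement is the Claim_ definition above) =====
set_option maxRecDepth 8000 in
theorem default_errors_py_spec : Claim_equal_default_errors_py := by
  intro method _
  unfold Spec_default_errors_py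
  by_cases h1 : method = "GET"
  · subst h1; decide
  by_cases h2 : method = "PATCH"
  · subst h2; decide
  by_cases h3 : method = "PUT"
  · subst h3; decide
  by_cases h4 : method = "DELETE"
  · subst h4; decide
  by_cases h5 : method = "POST"
  · subst h5; decide
  -- unrecognised method: both sides produce the default four lines
  have htab : pvTable = PySem.Dict.mk
      [ ("GET",    ["200 — successful response"] ++ pvCommon ++ [pvE404, pvE500]),
        ("PATCH",  ["200 — successful response"] ++ pvCommon ++ [pvE404, pvE409, pvE500]),
        ("PUT",    ["201 — created"] ++ pvCommon ++ [pvE404, pvE409, pvE500]),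
        ("DELETE", ["201 — created"] ++ pvCommon ++ [pvE404, pvE500]),
        ("POST",   ["201 — created"] ++ pvCommon ++ [pvE409, pvE500]) ] := rfl
  unfold default_errors_py default_errors_py_alt PySem.Dict.getD
  rw [htab]
  simp [PySem.Dict.get?_mk_cons, PySem.Dict.get?, Ne.symm h1, Ne.symm h2, Ne.symm h3,
    Ne.symm h4, Ne.symm h5, h1, h2, h3, h4, h5, pvDefault, pvCommon, pvE500]
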